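-- pv_equiv track=rewrite | github.com/sudog1/Algorithm | 프로그래머스/lv2/86971. 전력망을 둘로 나누기/전력망을 둘로 나누기.py | divide_power
-- ===== SOURCE A (Python) =====
-- def divide_power(tree, visit, cur_node, count_arr):
--     total = 1
--     for child in tree[cur_node]:
--         if visit[child]:
--             continue
--         visit[child] = 1
--         result = divide_power(tree, visit, child, count_arr)
--         total += result
--         count_arr[1] = min(abs(2*result-count_arr[0]), count_arr[1])
--     return total
-- ===== SOURCE B (Python) =====
-- def divide_power(tree, visit, cur_node, count_arr):
--     # Iterative DFS with an explicit stack of [node, next_child_index, subtree_size]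
--     # frames instead of recursion; performs the same visit/count_arr mutations.
--     stack = [[cur_node, 0, 1]]
--     result = 0
--     while stack:
--         node, i, size = stack[-1]
--         children = tree[node]
--         if i < len(children):
--             stack[-1][1] = i + 1
--             c = children[i]
--             if not visit[c]:
--                 visit[c] = 1
--                 stack.append([c, 0, 1])
--         else:
--             stack.pop()
--             if stack:
--                 stack[-1][2] += size
--                 count_arr[1] = min(abs(2 * size - count_arr[0]), count_arr[1])
--             else:
--                 result = size
--     return result
-- ===== Notes on version B (the rewrite author's own statement) =====
-- stated objective: alternative
-- what changed: Replaces the recursive DFS by an iterative DFS over an explicit stack of [node, next-child-index, subtree-size] frames: a completed frame's size is added to its parent frame and triggers the same count_arr[1] min-update, so return value and both in-place mutations are reproduced without recursion.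
-- outside the precondition, e.g. on divide_power({0: [], 1: [2]}, [9, 0], 0, []): A returns 1, B returns 1
import Mathlib
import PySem

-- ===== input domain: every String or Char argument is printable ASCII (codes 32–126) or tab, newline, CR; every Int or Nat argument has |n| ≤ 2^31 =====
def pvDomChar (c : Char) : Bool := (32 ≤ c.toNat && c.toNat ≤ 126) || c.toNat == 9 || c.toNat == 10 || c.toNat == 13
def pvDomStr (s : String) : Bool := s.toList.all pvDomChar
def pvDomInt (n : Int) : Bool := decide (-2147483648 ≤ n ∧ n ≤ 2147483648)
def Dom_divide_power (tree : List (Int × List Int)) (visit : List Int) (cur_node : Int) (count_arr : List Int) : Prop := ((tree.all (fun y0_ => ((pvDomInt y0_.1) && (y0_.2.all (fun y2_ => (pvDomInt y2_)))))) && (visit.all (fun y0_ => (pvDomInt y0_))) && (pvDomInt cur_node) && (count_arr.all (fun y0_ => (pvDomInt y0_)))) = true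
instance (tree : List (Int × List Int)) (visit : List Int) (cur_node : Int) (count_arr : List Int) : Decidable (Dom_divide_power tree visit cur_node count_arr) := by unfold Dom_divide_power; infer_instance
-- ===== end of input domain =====

-- B replaces A's recursive DFS by an iterative DFS over an explicit stack of (node, next-child-index,
-- subtree-size) frames (same child order, same visit/count_arr mutations in Python); the theorems below
-- are about the RETURN value only (both Pythons also mutate visit/count_arr identically).

-- dict lookup on the association list (first match)
def aget (tree : List (Int × List Int)) (k : Int) : Option (List Int) :=
  (tree.find? (fun p => p.1 == k)).map (·.2)

-- number of falsy entries of visit; each recursive call of A marks one, so it bounds the depth (fuel)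
def zeros (l : List Int) : Nat := l.countP (fun v => v == 0)

-- ===== PORT A =====
-- state threaded through the recursion: (total, visit, count_arr); none = a raise of the Python
mutual
def dpAgo (fuel : Nat) (tree : List (Int × List Int)) (visit : List Int) (cur : Int)
    (count : List Int) : Option (Int × List Int × List Int) :=
  match fuel with
  | 0 => none
  | f + 1 =>
    match aget tree cur with
    | none => none
    | some children => dpALoop f tree children 1 visit count
termination_by (fuel, 0)

def dpALoop (fuel : Nat) (tree : List (Int × List Int)) (cs : List Int) (total : Int)
    (visit : List Int) (count : List Int) : Option (Int × List Int × List Int) :=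
  match cs with
  | [] => some (total, visit, count)
  | c :: rest =>
    match PySem.List.pyGet? visit c with
    | none => none
    | some v =>
      if v ≠ 0 then dpALoop fuel tree rest total visit count
      else
        match PySem.List.pySet? visit c 1 with
        | none => none
        | some visit1 =>
          match dpAgo fuel tree visit1 c count with
          | none => none
          | some (r, visit2, count2) =>
            match PySem.List.pyGet? count2 0, PySem.List.pyGet? count2 1 with
            | some c0, some c1 =>
              match PySem.List.pySet? count2 1 (min |2 * r - c0| c1) with
              | none => none
              | some count3 => dpALoop fuel tree rest (total + r) visit2 count3
            | _, _ => none
termination_by (fuel, cs.length + 1)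
end

def divide_power (tree : List (Int × List Int)) (visit : List Int) (cur_node : Int) (count_arr : List Int) : Int :=
  match dpAgo (zeros visit + 1) tree visit cur_node count_arr with
  | some (t, _, _) => t
  | none => 0

-- ===== PORT B =====
-- remaining children of a frame, and total pending work of the stack (termination measure only)
def pendB (tree : List (Int × List Int)) (fr : Int × Nat × Int) : Nat :=
  ((aget tree fr.1).getD []).length - fr.2.1
def workB (tree : List (Int × List Int)) (stack : List (Int × Nat × Int)) : Nat :=
  (stack.map (pendB tree)).sum + stack.length

theorem countP_set_one_lt (l : List Int) (k : Nat) (hk : k < l.length) (h0 : l[k] = 0) :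
    (l.set k 1).countP (fun v => v == 0) < l.countP (fun v => v == 0) := by
  induction l generalizing k with
  | nil => simp at hk
  | cons a l ih =>
    cases k with
    | zero => simp_all
    | succ k =>
      have := ih k (by simpa using hk) (by simpa using h0)
      simp [List.countP_cons]
      omega

-- marking a falsy visit entry strictly decreases the number of zeros (used for B's termination)
theorem zeros_pySet_lt {visit visit1 : List Int} {c : Int}
    (hg : PySem.List.pyGet? visit c = some 0)
    (hs : PySem.List.pySet? visit c 1 = some visit1) :
    zeros visit1 < zeros visit := by
  unfold PySem.List.pyGet? at hg
  unfold PySem.List.pySet? at hs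
  cases hk : PySem.List.pyIdx? visit.length c with
  | none => rw [hk] at hg; simp at hg
  | some k =>
    rw [hk] at hg hs
    simp only [Option.bind_some, Option.map_some] at hg hs
    rcases List.getElem?_eq_some_iff.mp hg with ⟨hkl, h0⟩
    cases hs
    exact countP_set_one_lt visit k hkl h0

-- the explicit-stack while loop of Source B; frame = (node, next child index, subtree size)
def dpBLoop (tree : List (Int × List Int)) (stack : List (Int × Nat × Int))
    (visit : List Int) (count : List Int) (res : Int) : Option (Int × List Int × List Int) :=
  match stack with
  | [] => some (res, visit, count)
  | (node, i, size) :: rest =>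
    match h : aget tree node with
    | none => none
    | some children =>
      if hi : i < children.length then
        match hg : PySem.List.pyGet? visit (children[i]) with
        | none => none
        | some v =>
          if hv : v ≠ 0 then dpBLoop tree ((node, i + 1, size) :: rest) visit count res
          else
            match hs : PySem.List.pySet? visit (children[i]) 1 with
            | none => none
            | some visit1 =>
              dpBLoop tree ((children[i], 0, 1) :: (node, i + 1, size) :: rest) visit1 count res
      else
        match rest with
        | [] => dpBLoop tree ([] : List (Int × Nat × Int)) visit count size
        | (pn, pi, ps) :: rr =>
          match PySem.List.pyGet? count 0, PySem.List.pyGet? count 1 with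
          | some c0, some c1 =>
            match PySem.List.pySet? count 1 (min |2 * size - c0| c1) with
            | none => none
            | some count2 => dpBLoop tree ((pn, pi, ps + size) :: rr) visit count2 res
          | _, _ => none
termination_by (zeros visit, workB tree stack)
decreasing_by
  · apply Prod.Lex.right
    simp [workB, pendB, h]
    omega
  · apply Prod.Lex.left
    have hv0 : v = 0 := by omega
    exact zeros_pySet_lt (hv0 ▸ hg) hs
  · apply Prod.Lex.right
    simp [workB, pendB]
    try omega
  · apply Prod.Lex.right
    simp [workB, pendB]
    try omega

def divide_power_alt (tree : List (Int × List Int)) (visit : List Int) (cur_node : Int) (count_arr : List Int) : Int :=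
  match dpBLoop tree [(cur_node, 0, 1)] visit count_arr 0 with
  | some (r, _, _) => r
  | none => 0

-- ===== PRECONDITION & SPEC =====
-- Pre_ is a closed-form no-raise condition: cur_node is a key; every child of cur_node is a valid visit
-- index and, if unvisited, a key; count_arr has ≥ 2 entries when cur_node has an unvisited child (only then
-- is count_arr touched); and every entry whose key is a valid, unvisited index (the only entries a traversal
-- can ever enter) satisfies the same child conditions.  It still excludes a few inputs on which A returns:
-- those where such an unvisited entry has a bad child but is simply never reached from cur_node.
def Pre_divide_power (tree : List (Int × List Int)) (visit : List Int) (cur_node : Int) (count_arr : List Int) : Prop :=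
  (aget tree cur_node).isSome = true ∧
  (∀ c ∈ (aget tree cur_node).getD [], PySem.Raise.InRange visit.length c ∧
    (PySem.List.pyGet? visit c = some 0 → (aget tree c).isSome = true)) ∧
  ((∃ c ∈ (aget tree cur_node).getD [], PySem.List.pyGet? visit c = some 0) → 2 ≤ count_arr.length) ∧
  (∀ p ∈ tree, PySem.List.pyGet? visit p.1 = some 0 → ∀ c ∈ p.2,
    PySem.Raise.InRange visit.length c ∧
    (PySem.List.pyGet? visit c = some 0 → (aget tree c).isSome = true))

instance (tree : List (Int × List Int)) (visit : List Int) (cur_node : Int) (count_arr : List Int) : Decidable (Pre_divide_power tree visit cur_node count_arr) := by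
  unfold Pre_divide_power PySem.Raise.InRange; infer_instance

def pvWitness_divide_power : (List (Int × List Int)) × List Int × Int × List Int :=
  ([(0, [1]), (1, [])], [0, 0], 0, [2, 100])

def Spec_divide_power (tree : List (Int × List Int)) (visit : List Int) (cur_node : Int) (count_arr : List Int) (out : Int) : Prop := out = divide_power_alt tree visit cur_node count_arr
instance (tree : List (Int × List Int)) (visit : List Int) (cur_node : Int) (count_arr : List Int) (out : Int) : Decidable (Spec_divide_power tree visit cur_node count_arr out) := by unfold Spec_divide_power; infer_instance

-- ===== CLAIM (what is proved, stated in full; the proofs are below) =====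
def Claim_equal_divide_power : Prop := ∀ (tree : List (Int × List Int)) (visit : List Int) (cur_node : Int) (count_arr : List Int), Dom_divide_power tree visit cur_node count_arr → Pre_divide_power tree visit cur_node count_arr → Spec_divide_power tree visit cur_node count_arr (divide_power tree visit cur_node count_arr)

-- ===== LEMMAS AND PROOFS =====

theorem aget_mem {tree : List (Int × List Int)} {k : Int} {v : List Int}
    (h : aget tree k = some v) : (k, v) ∈ tree := by
  unfold aget at h
  cases hf : tree.find? (fun p => p.1 == k) with
  | none => rw [hf] at h; simp at h
  | some p =>
    rw [hf] at h
    simp only [Option.map_some, Option.some.injEq] at h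
    have hm := List.mem_of_find?_eq_some hf
    have hp := List.find?_some hf
    simp only [beq_iff_eq] at hp
    obtain ⟨p1, p2⟩ := p
    simp only at hp h
    subst hp; subst h; exact hm

theorem pyIdx?_some_of_InRange (n : Nat) (i : Int) (h : PySem.Raise.InRange n i) :
    ∃ k, PySem.List.pyIdx? n i = some k ∧ k < n := by
  obtain ⟨h1, h2⟩ := h
  unfold PySem.List.pyIdx?
  by_cases h0 : 0 ≤ i
  · exact ⟨i.toNat, by rw [if_pos h0, if_pos h2], by omega⟩
  · exact ⟨n - (-i).toNat, by rw [if_neg h0, if_pos h1], by omega⟩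

theorem pyGet?_some_of_InRange {α : Type} (xs : List α) (i : Int)
    (h : PySem.Raise.InRange xs.length i) : ∃ v, PySem.List.pyGet? xs i = some v := by
  obtain ⟨k, hk, hkn⟩ := pyIdx?_some_of_InRange xs.length i h
  exact ⟨xs[k], by unfold PySem.List.pyGet?; rw [hk]; simp [List.getElem?_eq_getElem hkn]⟩

theorem pySet?_some_of_InRange {α : Type} (xs : List α) (i : Int) (v : α)
    (h : PySem.Raise.InRange xs.length i) :
    ∃ ys, PySem.List.pySet? xs i v = some ys ∧ ys.length = xs.length := by
  obtain ⟨k, hk, hkn⟩ := pyIdx?_some_of_InRange xs.length i h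
  exact ⟨xs.set k v, by unfold PySem.List.pySet?; rw [hk]; rfl, by simp⟩

-- drop i children = c :: cs  ⇒  facts about i, children[i], drop (i+1)
theorem drop_cons_facts {children cs : List Int} {c : Int} {i : Nat}
    (h : children.drop i = c :: cs) :
    ∃ hi : i < children.length, children[i] = c ∧ children.drop (i + 1) = cs := by
  have hlen : i < children.length := by
    by_contra hc
    rw [List.drop_eq_nil_of_le (by omega)] at h
    exact List.cons_ne_nil _ _ h.symm
  refine ⟨hlen, ?_, ?_⟩
  · have h0 : (children.drop i)[0]? = some c := by rw [h]; rfl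
    rw [List.getElem?_drop] at h0
    have h1 : children[i]? = some c := by simpa using h0
    exact (List.getElem?_eq_some_iff.mp h1).2
  · have h1 : (children.drop i).drop 1 = (c :: cs).drop 1 := by rw [h]
    simpa [List.drop_drop, Nat.add_comm] using h1

-- the continuation of B's machine after the top frame finishes with subtree size t and state (v', c')
def dpBCont (tree : List (Int × List Int)) (rest : List (Int × Nat × Int)) (t : Int)
    (v' c' : List Int) (res : Int) : Option (Int × List Int × List Int) :=
  match rest with
  | [] => some (t, v', c')
  | (pn, pi, ps) :: rr =>
    match PySem.List.pyGet? c' 0, PySem.List.pyGet? c' 1 with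
    | some c0, some c1 =>
      match PySem.List.pySet? c' 1 (min |2 * t - c0| c1) with
      | none => none
      | some c2 => dpBLoop tree ((pn, pi, ps + t) :: rr) v' c2 res
    | _, _ => none

-- simulation: if A's loop over the remaining children succeeds, B's machine on the corresponding
-- frame reaches exactly the continuation of that frame with the same size and state
theorem simB (fa : Nat) : ∀ (cs : List Int) (tree : List (Int × List Int)) (cur : Int)
    (children : List Int) (i : Nat) (size : Int) (rest : List (Int × Nat × Int))
    (visit count : List Int) (res t : Int) (v' c' : List Int),
    aget tree cur = some children →
    children.drop i = cs →
    dpALoop fa tree cs size visit count = some (t, v', c') →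
    dpBLoop tree ((cur, i, size) :: rest) visit count res = dpBCont tree rest t v' c' res := by
  induction fa using Nat.strong_induction_on with
  | _ fa IH =>
    intro cs
    induction cs with
    | nil =>
      intro tree cur children i size rest visit count res t v' c' hget hdrop hA
      rw [dpALoop] at hA
      simp only [Option.some.injEq, Prod.mk.injEq] at hA
      obtain ⟨ht, hv, hc⟩ := hA
      subst ht; subst hv; subst hc
      have hge : ¬ i < children.length := by
        by_contra hlt
        have hne : children.drop i ≠ [] := by
          intro hnil
          have hl := congrArg List.length hnil
          simp [List.length_drop] at hl
          omega
        exact hne hdrop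
      rw [dpBLoop.eq_def]
      simp only []
      split
      next hq => rw [hget] at hq; exact absurd hq (by simp)
      next children' hq =>
        rw [hget] at hq
        injection hq with hq
        subst hq
        rw [dif_neg hge]
        cases rest with
        | nil =>
          simp only []
          rw [dpBLoop.eq_def]
          rfl
        | cons p rr => obtain ⟨pn, pi, ps⟩ := p; rfl
    | cons c cs2 ihcs =>
      intro tree cur children i size rest visit count res t v' c' hget hdrop hA
      obtain ⟨hi, hci, hdrop2⟩ := drop_cons_facts hdrop
      rw [dpALoop] at hA
      cases hg : PySem.List.pyGet? visit c with
      | none => rw [hg] at hA; simp at hA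
      | some v =>
        rw [hg] at hA
        simp only [] at hA
        rw [dpBLoop.eq_def]
        simp only []
        split
        next hq => rw [hget] at hq; exact absurd hq (by simp)
        next children' hq =>
          rw [hget] at hq
          injection hq with hq
          subst hq
          rw [dif_pos hi]
          rw [show children[i] = c from hci]
          split
          next hq2 => rw [hg] at hq2; exact absurd hq2 (by simp)
          next v2 hq2 =>
            rw [hg] at hq2
            injection hq2 with hq2
            subst hq2
            by_cases hv : v ≠ 0
            · rw [if_pos hv] at hA
              rw [dif_pos hv]
              exact ihcs tree cur children (i + 1) size rest visit count res t v' c' hget hdrop2 hA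
            · rw [if_neg hv] at hA
              rw [dif_neg hv]
              cases hs : PySem.List.pySet? visit c 1 with
              | none => rw [hs] at hA; simp at hA
              | some visit1 =>
                rw [hs] at hA
                simp only [] at hA
                cases hgo : dpAgo fa tree visit1 c count with
                | none => rw [hgo] at hA; simp at hA
                | some triple =>
                  obtain ⟨r, visit2, count2⟩ := triple
                  rw [hgo] at hA
                  simp only [] at hA
                  cases hg0 : PySem.List.pyGet? count2 0 with
                  | none => rw [hg0] at hA; simp at hA
                  | some c0 =>
                    cases hg1 : PySem.List.pyGet? count2 1 with
                    | none => rw [hg0, hg1] at hA; simp at hA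
                    | some c1 =>
                      rw [hg0, hg1] at hA
                      simp only [] at hA
                      cases hs2 : PySem.List.pySet? count2 1 (min |2 * r - c0| c1) with
                      | none => rw [hs2] at hA; simp at hA
                      | some count3 =>
                        rw [hs2] at hA
                        simp only [] at hA
                        -- A recursed: fa = f + 1 and the child's loop ran at fuel f
                        cases fa with
                        | zero => rw [dpAgo] at hgo; simp at hgo
                        | succ f =>
                          rw [dpAgo] at hgo
                          cases hgc : aget tree c with
                          | none => rw [hgc] at hgo; simp at hgo
                          | some childc =>
                            rw [hgc] at hgo
                            simp only [] at hgo
                            have hchild := IH f (by omega) childc tree c childc 0 1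
                              ((cur, i + 1, size) :: rest) visit1 count res r visit2 count2
                              hgc (by simp) hgo
                            split
                            next hq3 => exact absurd hq3 (by simp)
                            next visit1' hq3 =>
                              injection hq3 with hq3
                              subst hq3
                              rw [hchild]
                              rw [dpBCont]
                              rw [hg0, hg1]
                              simp only []
                              rw [hs2]
                              simp only []
                              exact ihcs tree cur children (i + 1) (size + r) rest visit2 count3
                                res t v' c' hget hdrop2 hA

-- monotonicity helpers for the sufficiency argument
theorem pyGet?_zero_mono {v v0 : List Int} {c : Int}
    (hlen : v.length = v0.length) (hm : ∀ n : Nat, v[n]? = some 0 → v0[n]? = some 0)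
    (h : PySem.List.pyGet? v c = some 0) : PySem.List.pyGet? v0 c = some 0 := by
  unfold PySem.List.pyGet? at h ⊢
  rw [← hlen]
  cases hk : PySem.List.pyIdx? v.length c with
  | none => rw [hk] at h; simp at h
  | some k => rw [hk] at h; simp only [Option.bind_some] at h ⊢; exact hm k h

theorem pySet1_zero_mono {v v1 : List Int} {c : Int}
    (hs : PySem.List.pySet? v c 1 = some v1) :
    ∀ n : Nat, v1[n]? = some 0 → v[n]? = some 0 := by
  intro n hn
  unfold PySem.List.pySet? at hs
  cases hk : PySem.List.pyIdx? v.length c with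
  | none => rw [hk] at hs; simp at hs
  | some k =>
    rw [hk] at hs
    simp only [Option.map_some, Option.some.injEq] at hs
    subst hs
    rw [List.getElem?_set] at hn
    by_cases hnk : k = n
    · rw [if_pos hnk] at hn
      split at hn <;> simp at hn
    · rw [if_neg hnk] at hn
      exact hn

theorem pyGet?_some_of_InRange' {α : Type} (xs : List α) (i : Int) (n : Nat)
    (hlen : xs.length = n) (h : PySem.Raise.InRange n i) :
    ∃ v, PySem.List.pyGet? xs i = some v :=
  pyGet?_some_of_InRange xs i (by rw [hlen]; exact h)

-- sufficiency: under Pre_'s conditions A's loop never raises, given fuel ≥ zeros of the current visit;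
-- it preserves lengths, never unmarks a visit entry, and never increases zeros
theorem sufA (fa : Nat) : ∀ (cs : List Int) (tree : List (Int × List Int))
    (v0 v count : List Int) (size : Int),
    (∀ p ∈ tree, PySem.List.pyGet? v0 p.1 = some 0 → ∀ c ∈ p.2,
      PySem.Raise.InRange v0.length c ∧
      (PySem.List.pyGet? v0 c = some 0 → (aget tree c).isSome = true)) →
    (∀ c ∈ cs, PySem.Raise.InRange v0.length c ∧
      (PySem.List.pyGet? v0 c = some 0 → (aget tree c).isSome = true)) →
    (∀ n : Nat, v[n]? = some 0 → v0[n]? = some 0) →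
    v.length = v0.length →
    ((∃ c ∈ cs, PySem.List.pyGet? v c = some 0) → 2 ≤ count.length) →
    zeros v ≤ fa →
    ∃ t v' c', dpALoop fa tree cs size v count = some (t, v', c') ∧
      v'.length = v.length ∧ c'.length = count.length ∧ zeros v' ≤ zeros v ∧
      (∀ n : Nat, v'[n]? = some 0 → v[n]? = some 0) := by
  induction fa using Nat.strong_induction_on with
  | _ fa IH =>
    intro cs
    induction cs with
    | nil =>
      intro tree v0 v count size _ _ _ _ _ _
      exact ⟨size, v, count, by rw [dpALoop], rfl, rfl, le_refl _, fun n h => h⟩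
    | cons c cs2 ihcs =>
      intro tree v0 v count size HT Hcs Hm Hlen Hc hfu
      obtain ⟨hir0, hkeyc⟩ := Hcs c (by simp)
      obtain ⟨vv, hg⟩ := pyGet?_some_of_InRange' v c v0.length Hlen hir0
      rw [dpALoop, hg]
      simp only []
      by_cases hv : vv ≠ 0
      · rw [if_pos hv]
        obtain ⟨t, v', c', h1, h2, h3, h4, h5⟩ := ihcs tree v0 v count size HT
          (fun x hx => Hcs x (by simp [hx])) Hm Hlen
          (fun ⟨x, hx, hx0⟩ => Hc ⟨x, by simp [hx], hx0⟩) hfu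
        exact ⟨t, v', c', h1, h2, h3, h4, h5⟩
      · rw [if_neg hv]
        have hv0 : vv = 0 := by omega
        subst hv0
        have hcl : 2 ≤ count.length := Hc ⟨c, by simp, hg⟩
        have hg00 : PySem.List.pyGet? v0 c = some 0 := pyGet?_zero_mono Hlen Hm hg
        obtain ⟨v1, hs, hlen1⟩ := pySet?_some_of_InRange v c 1 (by rw [Hlen]; exact hir0)
        rw [hs]
        simp only []
        have hz1 : zeros v1 < zeros v := zeros_pySet_lt hg hs
        have hm1 : ∀ n : Nat, v1[n]? = some 0 → v[n]? = some 0 := pySet1_zero_mono hs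
        cases fa with
        | zero => omega
        | succ f =>
          rw [dpAgo]
          obtain ⟨childc, hgc⟩ := Option.isSome_iff_exists.mp (hkeyc hg00)
          rw [hgc]
          simp only []
          have hchild := IH f (by omega) childc tree v0 v1 count 1 HT
            (HT (c, childc) (aget_mem hgc) hg00)
            (fun n hn => Hm n (hm1 n hn)) (by omega)
            (fun _ => hcl) (by omega)
          obtain ⟨r, v2, c2, hgo, hlen2, hlenc2, hz2, hm2⟩ := hchild
          rw [hgo]
          simp only []
          obtain ⟨c0, hg0⟩ := pyGet?_some_of_InRange c2 0 (by constructor <;> omega)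
          obtain ⟨c1, hg1⟩ := pyGet?_some_of_InRange c2 1 (by constructor <;> omega)
          rw [hg0, hg1]
          simp only []
          obtain ⟨count3, hs2, hlenc3⟩ := pySet?_some_of_InRange c2 1 (min |2 * r - c0| c1)
            (by constructor <;> omega)
          rw [hs2]
          simp only []
          have hrest := ihcs tree v0 v2 count3 (size + r) HT
            (fun x hx => Hcs x (by simp [hx])) (fun n hn => Hm n (hm1 n (hm2 n hn)))
            (by omega) (fun _ => by omega) (by omega)
          obtain ⟨t, v', c', hloop, hl1, hl2, hl3, hl4⟩ := hrest
          exact ⟨t, v', c', hloop, by omega, by omega, by omega,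
            fun n hn => hm1 n (hm2 n (hl4 n hn))⟩

-- ===== VERDICT (by name: the statement is the Claim_ definition above) =====
theorem divide_power_spec : Claim_equal_divide_power := by
  intro tree visit cur_node count_arr _ hpre
  obtain ⟨hcur, hch, hcnt, hHT⟩ := hpre
  obtain ⟨children, hgc⟩ := Option.isSome_iff_exists.mp hcur
  rw [hgc] at hch hcnt
  simp only [Option.getD_some] at hch hcnt
  obtain ⟨t, v', c', hloop, _, _, _, _⟩ := sufA (zeros visit) children tree visit visit count_arr 1
    hHT hch (fun n h => h) rfl hcnt (le_refl _)
  have hgo : dpAgo (zeros visit + 1) tree visit cur_node count_arr = some (t, v', c') := by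
    rw [dpAgo, hgc]
    simp only []
    exact hloop
  have hB := simB (zeros visit) children tree cur_node children 0 1 [] visit count_arr 0
    t v' c' hgc (by simp) hloop
  unfold Spec_divide_power divide_power divide_power_alt
  rw [hgo, hB]
  rfl
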